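-- pv_equiv track=rewrite | github.com/WonderMing13/freemacinput | test_context_logic.py | is_inside_block_comment
-- ===== SOURCE A (Python) =====
-- def get_current_line(text, offset):
--     """获取当前行"""
--     last_newline = text.rfind('\n', 0, offset)
--     line_start = last_newline + 1 if last_newline >= 0 else 0
--     next_newline = text.find('\n', offset)
--     line_end = next_newline if next_newline >= 0 else len(text)
--     return text[line_start:line_end]
--
-- def is_inside_block_comment(text, offset):
--     """检测光标是否在块注释内部"""
--     safe_offset = min(offset, len(text))
--
--     # 方法1: 检查光标之前的深度
--     depth = 0
--     i = 0
--     while i < safe_offset: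
--         if i + 1 <= safe_offset:
--             two_chars = text[i:min(i + 2, len(text))]
--             if two_chars == "/*":
--                 if i < safe_offset:
--                     depth += 1
--                 i += 2
--             elif two_chars == "*/":
--                 if i < safe_offset:
--                     if depth > 0:
--                         depth -= 1
--                 i += 2
--             else:
--                 i += 1
--         else:
--             i += 1
--
--     if depth > 0:
--         return True
--
--     # 方法2: 检查当前行
--     current_line = get_current_line(text, safe_offset)
--     line_start_index = text.rfind('\n', 0, safe_offset) + 1
--     line_offset = min(safe_offset - line_start_index, len(current_line))
--
--     open_pos = current_line.find("/*")
--     close_pos = current_line.find("*/")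
--
--     if open_pos < 0:
--         return False
--     if close_pos < 0:
--         return True
--     if close_pos <= open_pos:
--         return False
--
--     return line_offset > open_pos + 2 and line_offset < close_pos
-- ===== SOURCE B (Python) =====
-- def _ends_inside_comment(text, limit):
--     """True iff position `limit` falls inside an unclosed block comment.
--     Jumps from marker to marker with str.find (two parser states: code /
--     comment with nesting) instead of walking the text character by character."""
--     i = 0
--     while True:  # code state: comment markers before `limit`?
--         op = text.find("/*", i)
--         cl = text.find("*/", i)
--         p = cl if op < 0 or (0 <= cl < op) else op
--         if p < 0 or p >= limit:
--             return False
--         if p != op:          # stray "*/" in code: skip it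
--             i = p + 2
--             continue
--         depth = 1            # comment state: balance nested markers
--         i = p + 2
--         while depth:
--             op = text.find("/*", i)
--             cl = text.find("*/", i)
--             p = cl if op < 0 or (0 <= cl < op) else op
--             if p < 0 or p >= limit:
--                 return True  # comment still open at `limit`
--             depth += 1 if p == op else -1
--             i = p + 2
--
-- def is_inside_block_comment(text, offset):
--     safe_offset = min(offset, len(text))
--     if _ends_inside_comment(text, safe_offset):
--         return True
--     # current-line heuristic
--     line_start = text.rfind('\n', 0, safe_offset) + 1
--     next_nl = text.find('\n', safe_offset)
--     line_end = next_nl if next_nl >= 0 else len(text)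
--     line = text[line_start:line_end]
--     line_offset = min(safe_offset - line_start, len(line))
--     open_pos = line.find("/*")
--     close_pos = line.find("*/")
--     return open_pos >= 0 and (close_pos < 0 or
--                               (open_pos < close_pos and
--                                open_pos + 2 < line_offset < close_pos))
-- ===== Notes on version B (the rewrite author's own statement) =====
-- stated objective: faster
-- what changed: A's single per-character walk with a clamped depth counter is replaced by a two-state parser (code state / comment state with explicit nesting) that jumps from marker to marker with str.find, so no character loop and no clamped counter remain; the current-line branch chain becomes one boolean expression.
import Mathlib
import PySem

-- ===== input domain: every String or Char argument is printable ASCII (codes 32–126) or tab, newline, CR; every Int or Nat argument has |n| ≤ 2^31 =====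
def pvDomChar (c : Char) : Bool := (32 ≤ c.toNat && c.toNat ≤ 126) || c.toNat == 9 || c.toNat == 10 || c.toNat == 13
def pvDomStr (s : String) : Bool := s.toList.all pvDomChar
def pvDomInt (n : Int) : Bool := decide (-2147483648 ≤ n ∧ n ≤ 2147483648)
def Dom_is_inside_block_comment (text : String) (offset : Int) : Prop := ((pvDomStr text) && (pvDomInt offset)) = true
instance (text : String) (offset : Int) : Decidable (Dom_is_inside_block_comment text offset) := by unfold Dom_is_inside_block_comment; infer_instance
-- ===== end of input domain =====

-- B replaces A's per-character depth walk by a two-state parser (code / comment-with-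
-- nesting) that jumps from marker to marker with str.find, so the clamped counter
-- disappears; the current-line branches become one boolean expression (measured faster
-- by a constant factor: find jumps instead of a per-character Python loop).

-- ===== PORT A =====

-- helper: get_current_line(text, offset)
def pvGetCurrentLine (text : String) (offset : Int) : String :=
  let last_newline := PySem.Str.rfindFrom text "\n" 0 (some offset)
  let line_start := if last_newline ≥ 0 then last_newline + 1 else 0
  let next_newline := PySem.Str.findFrom text "\n" offset
  let line_end := if next_newline ≥ 0 then next_newline else PySem.Str.len text
  PySem.Str.slice text (some line_start) (some line_end)

-- the 'while i < safe_offset' walk of A, on the text's characters; the Nat argument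
-- is fuel bounding the loop measure (so - i) and only makes the recursion total
def pvLoopA (t : List Char) (so : Int) : Nat → Int → Int → Int
  | 0, _, depth => depth
  | n + 1, i, depth =>
    if i < so then
      if i + 1 ≤ so then
        let two_chars := PySem.List.slice t (some i) (some (min (i + 2) (t.length : Int)))
        if two_chars = ['/', '*'] then
          pvLoopA t so n (i + 2) (if i < so then depth + 1 else depth)
        else if two_chars = ['*', '/'] then
          pvLoopA t so n (i + 2) (if i < so then (if depth > 0 then depth - 1 else depth) else depth)
        else
          pvLoopA t so n (i + 1) depth
      else
        pvLoopA t so n (i + 1) depth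
    else depth

def is_inside_block_comment (text : String) (offset : Int) : Bool :=
  let safe_offset := min offset (PySem.Str.len text)
  let depth := pvLoopA text.toList safe_offset safe_offset.toNat 0 0
  if depth > 0 then true
  else
    let current_line := pvGetCurrentLine text safe_offset
    let line_start_index := PySem.Str.rfindFrom text "\n" 0 (some safe_offset) + 1
    let line_offset := min (safe_offset - line_start_index) (PySem.Str.len current_line)
    let open_pos := PySem.Str.find current_line "/*"
    let close_pos := PySem.Str.find current_line "*/"
    if open_pos < 0 then false
    else if close_pos < 0 then true
    else if close_pos ≤ open_pos then false
    else decide (line_offset > open_pos + 2 ∧ line_offset < close_pos)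

-- ===== PORT B =====

-- 'p = cl if op < 0 or (0 <= cl < op) else op' — the earlier of the two finds
def pvNextMarker (t : List Char) (i : Int) : Int :=
  let op := PySem.Chars.findFrom t ['/', '*'] i none
  let cl := PySem.Chars.findFrom t ['*', '/'] i none
  if op < 0 ∨ (0 ≤ cl ∧ cl < op) then cl else op

-- _ends_inside_comment's two nested while loops, as one recursion on the pair
-- (i, depth): depth = 0 is the outer (code) loop, depth ≠ 0 the inner (comment) loop.
-- The Nat argument is fuel bounding the loop measure (limit - i); it only makes the
-- recursion total: fuel runs out exactly when i has passed limit, where the loops exit.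
def pvScanGo (t : List Char) (limit : Int) : Nat → Int → Int → Bool
  | 0, _, depth => decide (depth ≠ 0)
  | n + 1, i, depth =>
    let p := pvNextMarker t i
    if p < 0 ∨ p ≥ limit then decide (depth ≠ 0)
    else if depth = 0 then
      if p ≠ PySem.Chars.findFrom t ['/', '*'] i none then
        pvScanGo t limit n (p + 2) 0        -- stray "*/" in code: skip it
      else
        pvScanGo t limit n (p + 2) 1        -- enter the comment loop
    else
      let depth' := if p = PySem.Chars.findFrom t ['/', '*'] i none then depth + 1 else depth - 1
      pvScanGo t limit n (p + 2) depth'     -- depth' = 0 re-enters the code loop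

def is_inside_block_comment_alt (text : String) (offset : Int) : Bool :=
  let safe_offset := min offset (PySem.Str.len text)
  if pvScanGo text.toList safe_offset safe_offset.toNat 0 0 then true
  else
    let line_start := PySem.Str.rfindFrom text "\n" 0 (some safe_offset) + 1
    let next_nl := PySem.Str.findFrom text "\n" safe_offset
    let line_end := if next_nl ≥ 0 then next_nl else PySem.Str.len text
    let line := PySem.Str.slice text (some line_start) (some line_end)
    let line_offset := min (safe_offset - line_start) (PySem.Str.len line)
    let open_pos := PySem.Str.find line "/*"
    let close_pos := PySem.Str.find line "*/"
    decide (open_pos ≥ 0 ∧ (close_pos < 0 ∨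
      (open_pos < close_pos ∧ open_pos + 2 < line_offset ∧ line_offset < close_pos)))

-- ===== PRECONDITION & SPEC =====
def Spec_is_inside_block_comment (text : String) (offset : Int) (out : Bool) : Prop := out = is_inside_block_comment_alt text offset
instance (text : String) (offset : Int) (out : Bool) : Decidable (Spec_is_inside_block_comment text offset out) := by unfold Spec_is_inside_block_comment; infer_instance

-- ===== CLAIM (what is proved, stated in full; the proofs are below) =====
def Claim_equal_is_inside_block_comment : Prop := ∀ (text : String) (offset : Int), Dom_is_inside_block_comment text offset → Spec_is_inside_block_comment text offset (is_inside_block_comment text offset)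

-- ===== LEMMAS AND PROOFS =====

-- the marker (if any) starting at position j of the text
def pvMarkAt (t : List Char) (j : Int) : Option Bool :=
  if (t.drop j.toNat).take 2 = ['/', '*'] then some true
  else if (t.drop j.toNat).take 2 = ['*', '/'] then some false
  else none

-- Chars.rfind.go never returns anything below -1
lemma pvRfindGo_ge (s sub : List Char) (k : Nat) : -1 ≤ PySem.Chars.rfind.go s sub k := by
  induction k with
  | zero => simp only [PySem.Chars.rfind.go]; split <;> omega
  | succ j ih =>
    rw [PySem.Chars.rfind.go]
    split
    · omega
    · exact ih

-- Chars.rfind never returns anything below -1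
lemma pvRfind_ge (l sub : List Char) : -1 ≤ PySem.Chars.rfind l sub := by
  unfold PySem.Chars.rfind; exact pvRfindGo_ge _ _ _

-- hence rfindFrom with start 0 never returns anything below -1
lemma pvRfindFrom_ge (s sub : String) (e : Int) : -1 ≤ PySem.Str.rfindFrom s sub 0 (some e) := by
  simp only [PySem.Str.rfindFrom_eq]
  unfold PySem.Chars.rfindFrom
  simp only
  split_ifs <;> first | omega | (rw [zero_add]; exact pvRfind_ge _ _)

-- A's two-character slice text[i:min(i+2, len(text))] is just 'take 2 of drop i'
lemma pvSlice_two (t : List Char) (i : Int) (hi : 0 ≤ i) :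
    PySem.List.slice t (some i) (some (min (i + 2) (t.length : Int))) = (t.drop i.toNat).take 2 := by
  rw [PySem.List.slice_toNat t hi (by omega)]
  by_cases h : i + 2 ≤ (t.length : Int)
  · have : (min (i + 2) (t.length : Int)).toNat = i.toNat + 2 := by omega
    rw [this]; congr 1; omega
  · have h1 : (min (i + 2) (t.length : Int)).toNat = t.length := by omega
    rw [h1]
    have h2 : (t.drop i.toNat).length ≤ 2 := by rw [List.length_drop]; omega
    rw [List.take_of_length_le h2, List.take_of_length_le (by rw [List.length_drop])]

-- the walk's value does not depend on the fuel once it covers the measure (so - i)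
lemma pvLoopA_fuel (t : List Char) (so : Int) :
    ∀ f g i d, (so - i).toNat ≤ f → (so - i).toNat ≤ g →
      pvLoopA t so f i d = pvLoopA t so g i d := by
  intro f
  induction f with
  | zero =>
    intro g i d hf hg
    rw [pvLoopA]
    cases g with
    | zero => rw [pvLoopA]
    | succ g => rw [pvLoopA, if_neg (by omega)]
  | succ f ih =>
    intro g i d hf hg
    by_cases h : i < so
    · obtain ⟨g', rfl⟩ : ∃ g', g = g' + 1 := ⟨g - 1, by omega⟩
      rw [pvLoopA, pvLoopA]
      simp only [if_pos h, if_pos (by omega : i + 1 ≤ so)]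
      split_ifs <;> exact ih g' _ _ (by omega) (by omega)
    · rw [pvLoopA]
      cases g with
      | zero => rw [pvLoopA, if_neg h]
      | succ g => rw [pvLoopA, if_neg h, if_neg h]

-- the walk run with exactly enough fuel
def pvRun (t : List Char) (so i d : Int) : Int := pvLoopA t so (so - i).toNat i d

lemma pvRun_exit (t : List Char) (so i d : Int) (h : ¬ i < so) : pvRun t so i d = d := by
  unfold pvRun
  rw [show (so - i).toNat = 0 from by omega, pvLoopA]

-- one step of A's walk, phrased with pvMarkAt
lemma pvLoopA_step (t : List Char) (so i d : Int) (h0 : 0 ≤ i) (h : i < so) :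
    pvRun t so i d =
      match pvMarkAt t i with
      | some true => pvRun t so (i + 2) (d + 1)
      | some false => pvRun t so (i + 2) (if d > 0 then d - 1 else d)
      | none => pvRun t so (i + 1) d := by
  unfold pvRun
  rw [show (so - i).toNat = ((so - i).toNat - 1) + 1 from by omega, pvLoopA]
  rw [if_pos h, if_pos (by omega : i + 1 ≤ so), pvSlice_two t i h0]
  unfold pvMarkAt
  split_ifs with h1 h2 <;> simp only [*, if_pos h] <;>
    exact pvLoopA_fuel t so _ _ _ _ (by omega) (by omega)

-- a marker-free stretch up to `so` leaves the depth unchanged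
lemma pvLoopA_skip (t : List Char) (so : Int) :
    ∀ n i d, (so - i).toNat ≤ n → 0 ≤ i →
    (∀ j : Int, i ≤ j → j < so → pvMarkAt t j = none) → pvRun t so i d = d := by
  intro n
  induction n with
  | zero =>
    intro i d hn hi _
    exact pvRun_exit t so i d (by omega)
  | succ n ih =>
    intro i d hn hi hnm
    by_cases h : i < so
    · rw [pvLoopA_step t so i d hi h, hnm i (le_refl _) h]
      exact ih (i + 1) d (by omega) (by omega) (fun j hj hj' => hnm j (by omega) hj')
    · exact pvRun_exit t so i d h

-- the walk crosses a marker-free stretch to the marker at p and consumes it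
lemma pvLoopA_jump (t : List Char) (so : Int) (p : Int) (b : Bool) :
    ∀ n i d, (p - i).toNat ≤ n → 0 ≤ i → i ≤ p → p < so →
    (∀ j : Int, i ≤ j → j < p → pvMarkAt t j = none) → pvMarkAt t p = some b →
    pvRun t so i d = pvRun t so (p + 2) (if b then d + 1 else if d > 0 then d - 1 else d) := by
  intro n
  induction n with
  | zero =>
    intro i d hn hi hip hp hnm hm
    have hieq : i = p := by omega
    subst hieq
    rw [pvLoopA_step t so i d hi (by omega), hm]
    cases b <;> simp
  | succ n ih =>
    intro i d hn hi hip hp hnm hm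
    by_cases hieq : i = p
    · subst hieq
      rw [pvLoopA_step t so i d hi (by omega), hm]
      cases b <;> simp
    · rw [pvLoopA_step t so i d hi (by omega), hnm i (le_refl _) (by omega)]
      exact ih (i + 1) d (by omega) (by omega) (by omega) hp
        (fun j hj hj' => hnm j (by omega) hj') hm

-- a start past the end of the string finds nothing (CPython's rule, kept by PySem)
lemma pvFindFrom_past (t sub : List Char) (i : Int) (h0 : 0 ≤ i) (h : (t.length : Int) < i) :
    PySem.Chars.findFrom t sub i none = -1 := by
  unfold PySem.Chars.findFrom
  simp only
  rw [if_neg (by omega : ¬ i < 0), if_pos (by omega)]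

lemma pvNoPrefix_of_not_infix (t sub : List Char) (k : Nat) (h : ¬ sub <:+: t.drop k) :
    ∀ j : Nat, k ≤ j → ¬ sub <+: t.drop j := by
  intro j hj hp
  apply h
  rw [← PySem.Chars.isIn_iff_infix, ← PySem.Chars.exists_prefix_drop_iff_isIn]
  exact ⟨j - k, by rwa [List.drop_drop, Nat.add_sub_cancel' hj]⟩

-- full first-occurrence characterisation of find(sub, i) for any int start i ≥ 0
lemma pvFindFrom_spec' (t sub : List Char) (i : Int) (h0 : 0 ≤ i) (hsub : sub ≠ []) :
    (PySem.Chars.findFrom t sub i none = -1 ∧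
      ∀ j : Int, i ≤ j → ¬ sub <+: t.drop j.toNat) ∨
    (0 ≤ PySem.Chars.findFrom t sub i none ∧ i ≤ PySem.Chars.findFrom t sub i none ∧
      sub <+: t.drop (PySem.Chars.findFrom t sub i none).toNat ∧
      ∀ j : Int, i ≤ j → j < PySem.Chars.findFrom t sub i none → ¬ sub <+: t.drop j.toNat) := by
  by_cases hle : i ≤ (t.length : Int)
  · have hk : i = ((i.toNat : Nat) : Int) := by omega
    by_cases hneg : PySem.Chars.findFrom t sub i none = -1
    · left
      refine ⟨hneg, ?_⟩
      rw [hk] at hneg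
      rw [PySem.Chars.findFrom_natCast_eq_neg_one_iff t sub i.toNat (by omega)] at hneg
      intro j hj
      exact pvNoPrefix_of_not_infix t sub i.toNat hneg j.toNat (by omega)
    · right
      rw [hk] at hneg ⊢
      obtain ⟨h1, h2, h3⟩ := PySem.Chars.findFrom_natCast_spec t sub i.toNat (by omega) hneg
      have hge : 0 ≤ PySem.Chars.findFrom t sub ((i.toNat : Nat) : Int) none := by
        rw [PySem.Chars.findFrom_natCast t sub i.toNat (by omega)] at hneg ⊢
        have := PySem.Chars.neg_one_le_find (t.drop i.toNat) sub
        split at hneg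
        · exact absurd rfl hneg
        · rename_i hc; rw [if_neg hc]; omega
      refine ⟨hge, h1, h2, ?_⟩
      intro j hj hjlt
      exact h3 j.toNat (by omega) (by omega)
  · left
    refine ⟨pvFindFrom_past t sub i h0 (by omega), ?_⟩
    intro j hj
    rw [List.drop_eq_nil_of_le (by omega)]
    simp [List.prefix_nil, hsub]

-- a two-character pattern is a prefix iff it is the first two characters
lemma pvPrefix_two (l M : List Char) (hM : M.length = 2) : M <+: l ↔ l.take 2 = M := by
  rw [List.prefix_iff_eq_take, hM, eq_comm]

lemma pvMarkAt_none (t : List Char) (j : Int)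
    (h1 : ¬ ['/', '*'] <+: t.drop j.toNat) (h2 : ¬ ['*', '/'] <+: t.drop j.toNat) :
    pvMarkAt t j = none := by
  rw [pvPrefix_two _ _ rfl] at h1
  rw [pvPrefix_two _ _ rfl] at h2
  simp [pvMarkAt, h1, h2]

lemma pvMarkAt_open (t : List Char) (j : Int) (h : ['/', '*'] <+: t.drop j.toNat) :
    pvMarkAt t j = some true := by
  rw [pvPrefix_two _ _ rfl] at h
  simp [pvMarkAt, h]

lemma pvMarkAt_close (t : List Char) (j : Int) (h : ['*', '/'] <+: t.drop j.toNat) :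
    pvMarkAt t j = some false := by
  rw [pvPrefix_two _ _ rfl] at h
  simp [pvMarkAt, h]

-- what pvNextMarker means in terms of pvMarkAt
lemma pvNextMarker_spec (t : List Char) (i : Int) (h0 : 0 ≤ i) :
    (pvNextMarker t i < 0 ∧ ∀ j : Int, i ≤ j → pvMarkAt t j = none) ∨
    (0 ≤ pvNextMarker t i ∧ i ≤ pvNextMarker t i ∧
     (∀ j : Int, i ≤ j → j < pvNextMarker t i → pvMarkAt t j = none) ∧
     pvMarkAt t (pvNextMarker t i) =
       some (decide (pvNextMarker t i = PySem.Chars.findFrom t ['/', '*'] i none))) := by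
  unfold pvNextMarker
  dsimp only
  rcases pvFindFrom_spec' t ['/', '*'] i h0 (by decide) with ⟨hop, hopN⟩ | ⟨hop0, hopi, hopP, hopN⟩ <;>
    rcases pvFindFrom_spec' t ['*', '/'] i h0 (by decide) with ⟨hcl, hclN⟩ | ⟨hcl0, hcli, hclP, hclN⟩
  · -- neither marker occurs
    left
    rw [if_pos (by omega)]
    exact ⟨by omega, fun j hj => pvMarkAt_none t j (hopN j hj) (hclN j hj)⟩
  · -- only "*/" occurs
    right
    rw [if_pos (by omega)]
    set cl := PySem.Chars.findFrom t ['*', '/'] i none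
    refine ⟨hcl0, hcli, fun j hj hj' => pvMarkAt_none t j (hopN j hj) (hclN j hj hj'), ?_⟩
    rw [pvMarkAt_close t cl hclP, decide_eq_false (by omega)]
  · -- only "/*" occurs
    right
    rw [if_neg (by omega)]
    set op := PySem.Chars.findFrom t ['/', '*'] i none
    refine ⟨hop0, hopi, fun j hj hj' => pvMarkAt_none t j (hopN j hj hj') (hclN j hj), ?_⟩
    rw [pvMarkAt_open t op hopP, decide_eq_true rfl]
  · -- both occur: the earlier wins (they can never sit at the same position)
    right
    set op := PySem.Chars.findFrom t ['/', '*'] i none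
    set cl := PySem.Chars.findFrom t ['*', '/'] i none
    have hne : op ≠ cl := by
      intro he
      rw [pvPrefix_two _ _ rfl] at hopP hclP
      rw [he] at hopP
      rw [hopP] at hclP
      exact absurd hclP (by decide)
    by_cases hlt : cl < op
    · rw [if_pos (by omega)]
      refine ⟨hcl0, hcli, fun j hj hj' => pvMarkAt_none t j (hopN j hj (by omega)) (hclN j hj hj'), ?_⟩
      rw [pvMarkAt_close t cl hclP, decide_eq_false (by omega)]
    · rw [if_neg (by omega)]
      refine ⟨hop0, hopi, fun j hj hj' => pvMarkAt_none t j (hopN j hj hj') (hclN j hj (by omega)), ?_⟩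
      rw [pvMarkAt_open t op hopP, decide_eq_true rfl]

-- the heart of the file: the find-jump state machine computes 'final walk depth > 0'
lemma pvScan_eq (t : List Char) (so : Int) :
    ∀ n : Nat, ∀ i d, (so - max i 0).toNat ≤ n → 0 ≤ i → 0 ≤ d →
      pvScanGo t so n i d = decide (0 < pvRun t so i d) := by
  intro n
  induction n with
  | zero =>
    intro i d hn hi hd
    rw [pvScanGo, pvRun_exit t so i d (by omega), decide_eq_decide]
    omega
  | succ n ih =>
    intro i d hn hi hd
    rw [pvScanGo]
    rcases pvNextMarker_spec t i hi with ⟨hneg, hnm⟩ | ⟨hp0, hpi, hnm, hmk⟩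
    · rw [if_pos (Or.inl hneg)]
      rw [pvLoopA_skip t so ((so - i).toNat) i d (le_refl _) hi (fun j hj _ => hnm j hj),
        decide_eq_decide]
      omega
    · set p := pvNextMarker t i with hp
      by_cases hso : p ≥ so
      · rw [if_pos (Or.inr hso)]
        rw [pvLoopA_skip t so ((so - i).toNat) i d (le_refl _) hi
          (fun j hj hj' => hnm j hj (by omega)), decide_eq_decide]
        omega
      · rw [if_neg (by omega)]
        by_cases hb : p = PySem.Chars.findFrom t ['/', '*'] i none
        · -- the marker at p is "/*"
          rw [decide_eq_true hb] at hmk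
          rw [pvLoopA_jump t so p true ((p - i).toNat) i d (le_refl _) hi hpi (by omega) hnm hmk]
          by_cases hd0 : d = 0
          · rw [if_pos hd0, if_neg (by omega), hd0]
            exact ih (p + 2) 1 (by omega) (by omega) (by omega)
          · rw [if_neg hd0]
            dsimp only
            rw [if_pos hb]
            exact ih (p + 2) (d + 1) (by omega) (by omega) (by omega)
        · -- the marker at p is "*/"
          rw [decide_eq_false hb] at hmk
          rw [pvLoopA_jump t so p false ((p - i).toNat) i d (le_refl _) hi hpi (by omega) hnm hmk]
          by_cases hd0 : d = 0
          · rw [if_pos hd0, if_pos (by omega), hd0, if_neg (by omega : ¬ (0:Int) > 0)]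
            exact ih (p + 2) 0 (by omega) (by omega) (by omega)
          · rw [if_neg hd0]
            dsimp only
            rw [if_neg hb, if_pos (by omega : d > 0)]
            exact ih (p + 2) (d - 1) (by omega) (by omega) (by omega)

-- A's four-way current-line branch chain collapses to B's single boolean expression
lemma pvPhase2 (op cl lo : Int) :
    (if op < 0 then false else if cl < 0 then true
     else if cl ≤ op then false else decide (lo > op + 2 ∧ lo < cl))
    = decide (op ≥ 0 ∧ (cl < 0 ∨ (op < cl ∧ op + 2 < lo ∧ lo < cl))) := by
  split_ifs <;> [skip; skip; skip; skip] <;> symm <;>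
    first
      | (rw [decide_eq_false_iff_not]; omega)
      | (rw [decide_eq_true_iff]; omega)
      | (rcases Decidable.em (lo > op + 2 ∧ lo < cl) with h | h
         · rw [decide_eq_true_iff.mpr h, decide_eq_true_iff]; omega
         · rw [decide_eq_false_iff_not.mpr h, decide_eq_false_iff_not]; omega)

-- ===== VERDICT (by name: the statement is the Claim_ definition above) =====
theorem is_inside_block_comment_spec : Claim_equal_is_inside_block_comment := by
  intro text offset _
  unfold Spec_is_inside_block_comment
  unfold is_inside_block_comment is_inside_block_comment_alt pvGetCurrentLine
  dsimp only
  set so := min offset (PySem.Str.len text) with hso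
  have hrun : pvLoopA text.toList so so.toNat 0 0 = pvRun text.toList so 0 0 := by
    unfold pvRun
    rw [sub_zero]
  have hscan : pvScanGo text.toList so so.toNat 0 0 = decide (0 < pvRun text.toList so 0 0) :=
    pvScan_eq text.toList so so.toNat 0 0 (by omega) (le_refl _) (le_refl _)
  rw [hscan, hrun]
  by_cases hpos : pvRun text.toList so 0 0 > 0
  · rw [if_pos hpos, if_pos (show decide (0 < pvRun text.toList so 0 0) = true by simpa using hpos)]
  · rw [if_neg hpos, if_neg (show ¬ decide (0 < pvRun text.toList so 0 0) = true by simpa using hpos)]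
    have hrf := pvRfindFrom_ge text "\n" so
    rw [show (if PySem.Str.rfindFrom text "\n" 0 (some so) ≥ 0 then PySem.Str.rfindFrom text "\n" 0 (some so) + 1 else 0)
        = PySem.Str.rfindFrom text "\n" 0 (some so) + 1 from by split_ifs <;> omega]
    exact pvPhase2 _ _ _
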